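/- GENERATED by farm/mkstatement.py from design/units.tsv (unit `start_decoder.F6`) and the assertions of Vorbis/Spec/StartDecoderB.lean — do not edit.
   THE STATEMENT of the proof unit `start_decoder.F6`: segment F6 of `start_decoder` (60 instructions; entries 0x115714;
   exits 0x113b22,0x115842; ranges 0x115714-0x115840)
   takes each of its entry assertions to one of its exit assertions (`Vorbis.Spec.StartDecoder.SegF6`), given the contracts of its callees.
   What the names mean: Vorbis/Spec/Basic.lean (the shared hypotheses), Vorbis/Spec/StartDecoderB.lean (the assertions). The theorem to prove:
   `theorem start_decoder_F6_ok : Vorbis.Spec.start_decoder_F6.Statement`. -/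
import Vorbis.Spec.Leaves
import Vorbis.Spec.Leaves2
import Vorbis.Spec.LibcSort
import Vorbis.Spec.StartDecoderB
namespace Vorbis.Spec.start_decoder_F6
open X86 X86.User Asan

/-- The statement of unit `start_decoder.F6`. -/
def Statement : Prop :=
  ∀ (Lay : Layout) (_hLay : Lay.hi = 0x1000000) (μ : Microarch) (_hμ : UserX.MicroOK μ) (u₀ : State)
    (_hcode : HasCodeNat Lay u₀ Vorbis.L.start_decoder.entry Vorbis.Code.code_start_decoder.nat Vorbis.L.start_decoder.size)
    (_h_asan_load2_noabort : Asan.SmallCheck Lay μ Vorbis.WayInv (Vorbis.CodeOK u₀) [.rax, .rcx, .rdx] 2 Vorbis.L.__asan_load2_noabort.entry)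
    (_h_asan_store2_noabort : Asan.SmallCheck Lay μ Vorbis.WayInv (Vorbis.CodeOK u₀) [.rax, .rcx, .rdx] 2 Vorbis.L.__asan_store2_noabort.entry)
    (_h_asan_load4_noabort : Asan.SmallCheck Lay μ Vorbis.WayInv (Vorbis.CodeOK u₀) [.rax, .rcx, .rdx] 4 Vorbis.L.__asan_load4_noabort.entry)
    (_h_qsort : ∀ (others : List Obj) (frames : List (Nat × FrameLayout)) (cmp : Word) (w : Nat), Vorbis.Spec.CmpSpec Lay μ u₀ others frames cmp w → Calls Lay μ Vorbis.WayInv (Vorbis.conv u₀) Vorbis.L.qsort.entry (Vorbis.Spec.qsort.spec others frames cmp w))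
    (_h_error : ∀ (others : List Obj) (frames : List (Nat × FrameLayout)), Calls Lay μ Vorbis.WayInv (Vorbis.conv u₀) Vorbis.L.error.entry (Vorbis.Spec.error.spec others frames))
    (_h_asan_store1_noabort : Asan.SmallCheck Lay μ Vorbis.WayInv (Vorbis.CodeOK u₀) [.rax, .rdx] 1 Vorbis.L.__asan_store1_noabort.entry)
    (_h_point_compare : ∀ (others : List Obj) (frames : List (Nat × FrameLayout)), Calls Lay μ Vorbis.WayInv (Vorbis.conv u₀) Vorbis.L.point_compare.entry (Vorbis.Spec.point_compare.spec others frames)),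
    Vorbis.Spec.StartDecoder.SegF6 Lay μ u₀

end Vorbis.Spec.start_decoder_F6
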